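-- pv_equiv track=rewrite | github.com/jcolinpatrick/kryptos | bench/segmenter.py | _find_alphabet_runs
-- ===== SOURCE A (Python) =====
-- from typing import Dict, List, Optional, Tuple
--
-- _AZ_FORWARD = "ABCDEFGHIJKLMNOPQRSTUVWXYZ"
--
-- _AZ_REVERSE = _AZ_FORWARD[::-1]
--
-- _QWERTY_ROWS = [
--     "QWERTYUIOP",
--     "ASDFGHJKL",
--     "ZXCVBNM",
-- ]
--
-- _QWERTY_FULL = "QWERTYUIOPASDFGHJKLZXCVBNM"
--
-- _MIN_ALPHABET_RUN: int = 10
--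
-- def _find_alphabet_runs(text: str) -> List[Tuple[int, int, str]]:
--     """Find runs that match known alphabet patterns.
--
--     Returns list of (start, end, pattern_name) tuples.
--     ``end`` is exclusive.
--     """
--     runs: list[tuple[int, int, str]] = []
--
--     patterns: list[tuple[str, str]] = [
--         (_AZ_FORWARD, "az_forward"),
--         (_AZ_REVERSE, "az_reverse"),
--         (_QWERTY_FULL, "qwerty"),
--     ]
--     for row_i, row in enumerate(_QWERTY_ROWS):
--         patterns.append((row, f"qwerty_row{row_i + 1}"))
--
--     for pattern, name in patterns:
--         plen = len(pattern)
--         # Search for substrings of the pattern of length >= _MIN_ALPHABET_RUN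
--         for start in range(len(text)):
--             remaining = len(text) - start
--             if remaining < _MIN_ALPHABET_RUN:
--                 break
--             # Try matching a substring of the pattern starting from any offset
--             for pat_offset in range(plen):
--                 match_len = 0
--                 while (match_len < remaining
--                        and pat_offset + match_len < plen
--                        and text[start + match_len] == pattern[pat_offset + match_len]):
--                     match_len += 1
--                 if match_len >= _MIN_ALPHABET_RUN:
--                     end = start + match_len
--                     # Check we don't already have a run covering this
--                     overlaps = False
--                     for rs, re_, _ in runs:
--                         if start < re_ and end > rs:
--                             # Keep the longer one
--                             overlaps = True
--                             break
--                     if not overlaps: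
--                         runs.append((start, end, name))
--                     break  # found a pattern match at this start, move on
--
--     # Sort by start position and deduplicate overlaps (keep longest)
--     runs.sort(key=lambda r: (r[0], -(r[1] - r[0])))
--     merged: list[tuple[int, int, str]] = []
--     for run in runs:
--         if merged and run[0] < merged[-1][1]:
--             # Overlapping — keep the longer one
--             if run[1] - run[0] > merged[-1][1] - merged[-1][0]:
--                 merged[-1] = run
--         else:
--             merged.append(run)
--     return merged
-- ===== SOURCE B (Python) =====
-- # B: per pattern, precompute a successor map and one backward pass of run lengths,
-- # replacing A's per-start offset/while scans; then the same overlap filter + sort/merge.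
-- from typing import List, Tuple
--
-- _AZ_FORWARD = "ABCDEFGHIJKLMNOPQRSTUVWXYZ"
-- _AZ_REVERSE = _AZ_FORWARD[::-1]
-- _QWERTY_ROWS = ["QWERTYUIOP", "ASDFGHJKL", "ZXCVBNM"]
-- _QWERTY_FULL = "QWERTYUIOPASDFGHJKLZXCVBNM"
-- _MIN_ALPHABET_RUN: int = 10
--
--
-- def _find_alphabet_runs(text: str) -> List[Tuple[int, int, str]]:
--     n = len(text)
--     runs: list[tuple[int, int, str]] = []
--
--     patterns = [
--         (_AZ_FORWARD, "az_forward"),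
--         (_AZ_REVERSE, "az_reverse"),
--         (_QWERTY_FULL, "qwerty"),
--     ]
--     for row_i, row in enumerate(_QWERTY_ROWS):
--         patterns.append((row, f"qwerty_row{row_i + 1}"))
--
--     for pattern, name in patterns:
--         members = set(pattern)
--         nxt = {pattern[i]: pattern[i + 1] for i in range(len(pattern) - 1)}
--         # runlen[i] = length of the longest match of text[i:] against the
--         # pattern starting at the (unique) position of text[i] in it.
--         runlen = [0] * (n + 1)
--         for i in range(n - 1, -1, -1):
--             if text[i] in members:
--                 if i + 1 < n and nxt.get(text[i]) == text[i + 1]: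
--                     runlen[i] = runlen[i + 1] + 1
--                 else:
--                     runlen[i] = 1
--         for start in range(0, n - _MIN_ALPHABET_RUN + 1):
--             L = runlen[start]
--             if L >= _MIN_ALPHABET_RUN:
--                 end = start + L
--                 if all(not (start < re_ and end > rs) for rs, re_, _ in runs):
--                     runs.append((start, end, name))
--
--     runs.sort(key=lambda r: (r[0], -(r[1] - r[0])))
--     merged: list[tuple[int, int, str]] = []
--     for run in runs:
--         if merged and run[0] < merged[-1][1]:
--             if run[1] - run[0] > merged[-1][1] - merged[-1][0]:
--                 merged[-1] = run
--         else:
--             merged.append(run)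
--     return merged
-- ===== Notes on version B (the rewrite author's own statement) =====
-- stated objective: faster
-- what changed: Instead of trying every pattern offset at every text position and re-walking each match with a while loop, B builds a per-pattern successor map and membership set, computes all match run lengths in one backward pass (runlen[i] = runlen[i+1]+1 when text[i+1] continues text[i] in the pattern), then does the same overlap filter, sort and merge.
import Mathlib
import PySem

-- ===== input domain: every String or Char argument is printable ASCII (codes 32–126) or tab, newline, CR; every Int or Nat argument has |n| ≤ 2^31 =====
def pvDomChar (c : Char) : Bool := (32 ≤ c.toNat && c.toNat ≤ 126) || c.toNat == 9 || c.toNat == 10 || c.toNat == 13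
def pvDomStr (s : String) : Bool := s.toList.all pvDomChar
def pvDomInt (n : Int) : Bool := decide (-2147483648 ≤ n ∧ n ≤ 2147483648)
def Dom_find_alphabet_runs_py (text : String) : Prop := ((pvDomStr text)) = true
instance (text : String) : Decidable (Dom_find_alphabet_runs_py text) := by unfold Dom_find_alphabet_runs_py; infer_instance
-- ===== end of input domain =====

-- B replaces A's per-start pattern-offset/while scans by a per-pattern successor map and one
-- backward run-length pass (objective: faster); the overlap filter and sort/merge are unchanged.

-- module constants (shared source-module context of both implementations)
def pvAZ_FORWARD : List Char := "ABCDEFGHIJKLMNOPQRSTUVWXYZ".toList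
-- _AZ_FORWARD[::-1]; exact by PySem.List.slice?_none_none_neg_one
def pvAZ_REVERSE : List Char := pvAZ_FORWARD.reverse
def pvQWERTY_ROWS : List (List Char) := ["QWERTYUIOP".toList, "ASDFGHJKL".toList, "ZXCVBNM".toList]
def pvQWERTY_FULL : List Char := "QWERTYUIOPASDFGHJKLZXCVBNM".toList

-- ===== PORT A =====
-- patterns list, built as in A (enumerate loop appending the f-string names)
def pvPatternsA : List (List Char × String) :=
  (PySem.List.enumerate pvQWERTY_ROWS 0).foldl
    (fun ps pr => ps ++ [(pr.2, "qwerty_row" ++ PySem.Int.toStr (pr.1 + 1))])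
    [(pvAZ_FORWARD, "az_forward"), (pvAZ_REVERSE, "az_reverse"), (pvQWERTY_FULL, "qwerty")]

-- the inner while loop (fuel = a bound on the remaining iterations, only for totality);
-- its guards prove both indices in range, so getD is exact here
def pvWhileAGo (t p : List Char) (start patOff : Nat) : Nat → Nat → Nat
  | 0, k => k
  | fuel + 1, k =>
    if k < t.length - start ∧ patOff + k < p.length ∧
        t.getD (start + k) ' ' = p.getD (patOff + k) ' ' then
      pvWhileAGo t p start patOff fuel (k + 1)
    else k

def pvWhileA (t p : List Char) (start patOff k : Nat) : Nat :=
  pvWhileAGo t p start patOff (t.length - start - k) k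

-- 'for pat_offset in range(plen)' with its break
def pvOffLoopA (t p : List Char) (name : String) (start : Nat)
    (runs : List (Int × Int × String)) : List Nat → List (Int × Int × String)
  | [] => runs
  | o :: rest =>
    let m := pvWhileA t p start o 0
    if 10 ≤ m then
      let e : Int := (start : Int) + (m : Int)
      if runs.any (fun r => decide ((start : Int) < r.2.1) && decide (r.1 < e)) then runs
      else runs ++ [((start : Int), e, name)]
    else pvOffLoopA t p name start runs rest

-- 'for start in range(len(text))' with its break when remaining < 10
def pvStartLoopA (t p : List Char) (name : String) :
    List (Int × Int × String) → List Nat → List (Int × Int × String)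
  | runs, [] => runs
  | runs, s :: rest =>
    if t.length - s < 10 then runs
    else pvStartLoopA t p name (pvOffLoopA t p name s runs (List.range p.length)) rest

def find_alphabet_runs_py (text : String) : List (Int × Int × String) :=
  let t := text.toList
  let runs := pvPatternsA.foldl
    (fun runs pr => pvStartLoopA t pr.1 pr.2 runs (List.range t.length)) []
  let sortedRuns := PySem.List.sorted2 runs (fun r => r.1) (fun r => -(r.2.1 - r.1))
  sortedRuns.foldl (fun merged run =>
    match merged.getLast? with
    | some last =>
      if run.1 < last.2.1 then
        if last.2.1 - last.1 < run.2.1 - run.1 then merged.dropLast ++ [run] else merged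
      else merged ++ [run]
    | none => merged ++ [run]) []

-- ===== PORT B =====
def pvPatternsB : List (List Char × String) :=
  (PySem.List.enumerate pvQWERTY_ROWS 0).foldl
    (fun ps pr => ps ++ [(pr.2, "qwerty_row" ++ PySem.Int.toStr (pr.1 + 1))])
    [(pvAZ_FORWARD, "az_forward"), (pvAZ_REVERSE, "az_reverse"), (pvQWERTY_FULL, "qwerty")]

-- {pattern[i]: pattern[i+1] for i in range(len(pattern)-1)}; indices in range, so getD is exact
def pvNxtB (p : List Char) : PySem.Dict Char Char :=
  (List.range (p.length - 1)).foldl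
    (fun d i => d.insert (p.getD i ' ') (p.getD (i + 1) ' ')) PySem.Dict.empty

-- the backward fill of runlen[0..n] as a structural recursion (runlen[i] from runlen[i+1])
def pvRunlenB (members : PySem.Set Char) (nxt : PySem.Dict Char Char) : List Char → List Nat
  | [] => [0]
  | c :: rest =>
    let r := pvRunlenB members nxt rest
    (if PySem.Set.contains members c then
       match rest with
       | c2 :: _ => if nxt.get? c = some c2 then r.headD 0 + 1 else 1
       | [] => 1
     else 0) :: r

-- 'for start in range(0, n - 10 + 1)'
def pvStartLoopB (name : String) (rl : List Nat) :
    List (Int × Int × String) → List Nat → List (Int × Int × String)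
  | runs, [] => runs
  | runs, s :: rest =>
    let L := rl.getD s 0
    let runs' :=
      if 10 ≤ L then
        let e : Int := (s : Int) + (L : Int)
        if runs.all (fun r => !(decide ((s : Int) < r.2.1) && decide (r.1 < e))) then
          runs ++ [((s : Int), e, name)]
        else runs
      else runs
    pvStartLoopB name rl runs' rest

def pvMergeB (merged : List (Int × Int × String)) (run : Int × Int × String) :
    List (Int × Int × String) :=
  match merged.getLast? with
  | some last =>
    if run.1 < last.2.1 then
      if last.2.1 - last.1 < run.2.1 - run.1 then merged.dropLast ++ [run] else merged
    else merged ++ [run]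
  | none => merged ++ [run]

def find_alphabet_runs_py_alt (text : String) : List (Int × Int × String) :=
  let t := text.toList
  let runs := pvPatternsB.foldl
    (fun runs pr =>
      pvStartLoopB pr.2 (pvRunlenB (PySem.Set.ofList pr.1) (pvNxtB pr.1) t) runs
        (List.range (t.length + 1 - 10))) []
  let sortedRuns := PySem.List.sorted2 runs (fun r => r.1) (fun r => -(r.2.1 - r.1))
  sortedRuns.foldl pvMergeB []

-- ===== PRECONDITION & SPEC =====
def Spec_find_alphabet_runs_py (text : String) (out : List (Int × Int × String)) : Prop := out = find_alphabet_runs_py_alt text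
instance (text : String) (out : List (Int × Int × String)) : Decidable (Spec_find_alphabet_runs_py text out) := by unfold Spec_find_alphabet_runs_py; infer_instance

-- ===== CLAIM (what is proved, stated in full; the proofs are below) =====
def Claim_equal_find_alphabet_runs_py : Prop := ∀ (text : String), Dom_find_alphabet_runs_py text → Spec_find_alphabet_runs_py text (find_alphabet_runs_py text)

-- ===== LEMMAS AND PROOFS =====

-- longest common prefix length of two character lists
def myLcp : List Char → List Char → Nat
  | a :: as, b :: bs => if a = b then myLcp as bs + 1 else 0
  | _, _ => 0

-- specification of runlen[i]: match length of the remaining text against the pattern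
def rlSpec (p : List Char) : List Char → Nat
  | [] => 0
  | c :: rest => if c ∈ p then myLcp (c :: rest) (p.drop (p.idxOf c)) else 0

theorem myLcp_nil_left (ys : List Char) : myLcp [] ys = 0 := by cases ys <;> rfl

theorem myLcp_nil_right (xs : List Char) : myLcp xs [] = 0 := by cases xs <;> rfl

theorem myLcp_cons_cons (a b : Char) (as bs : List Char) :
    myLcp (a :: as) (b :: bs) = if a = b then myLcp as bs + 1 else 0 := rfl

theorem pvWhileA_stop (t p : List Char) (start o k : Nat)
    (h : ¬(k < t.length - start ∧ o + k < p.length ∧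
        t.getD (start + k) ' ' = p.getD (o + k) ' ')) :
    myLcp (t.drop (start + k)) (p.drop (o + k)) = 0 := by
  rcases Nat.lt_or_ge (start + k) t.length with hs | hs
  · rcases Nat.lt_or_ge (o + k) p.length with ho | ho
    · have h3 : ¬ t.getD (start + k) ' ' = p.getD (o + k) ' ' := fun hc => h ⟨by omega, ho, hc⟩
      rw [List.getD_eq_getElem _ _ hs, List.getD_eq_getElem _ _ ho] at h3
      rw [List.drop_eq_getElem_cons hs, List.drop_eq_getElem_cons ho, myLcp_cons_cons,
        if_neg h3]
    · rw [List.drop_eq_nil_of_le ho, myLcp_nil_right]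
  · rw [List.drop_eq_nil_of_le hs, myLcp_nil_left]

theorem pvWhileAGo_eq_lcp (t p : List Char) (start o : Nat) :
    ∀ (fuel k : Nat), t.length - start - k ≤ fuel →
      pvWhileAGo t p start o fuel k = k + myLcp (t.drop (start + k)) (p.drop (o + k)) := by
  intro fuel
  induction fuel with
  | zero =>
    intro k hk
    have hcond : ¬(k < t.length - start ∧ o + k < p.length ∧
        t.getD (start + k) ' ' = p.getD (o + k) ' ') := fun hx => absurd hx.1 (by omega)
    rw [pvWhileAGo, pvWhileA_stop t p start o k hcond]
    omega
  | succ fuel ih =>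
    intro k hk
    rw [pvWhileAGo]
    by_cases hcond : k < t.length - start ∧ o + k < p.length ∧
        t.getD (start + k) ' ' = p.getD (o + k) ' '
    · obtain ⟨h1, h2, h3⟩ := hcond
      have hs : start + k < t.length := by omega
      rw [if_pos ⟨h1, h2, h3⟩, ih (k + 1) (by omega)]
      rw [List.drop_eq_getElem_cons hs, List.drop_eq_getElem_cons h2, myLcp_cons_cons]
      rw [List.getD_eq_getElem _ _ hs, List.getD_eq_getElem _ _ h2] at h3
      rw [if_pos h3, Nat.add_succ start k, Nat.add_succ o k]
      simp only [Nat.succ_eq_add_one]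
      omega
    · rw [if_neg hcond, pvWhileA_stop t p start o k hcond]
      omega

theorem pvWhileA_eq_lcp (t p : List Char) (start o k : Nat) :
    pvWhileA t p start o k = k + myLcp (t.drop (start + k)) (p.drop (o + k)) := by
  rw [pvWhileA]
  exact pvWhileAGo_eq_lcp t p start o (t.length - start - k) k (Nat.le_refl _)

theorem pvWhileA_zero (t p : List Char) (start o : Nat) :
    pvWhileA t p start o 0 = myLcp (t.drop start) (p.drop o) := by
  simpa using pvWhileA_eq_lcp t p start o 0

theorem offLoopA_skip (t p : List Char) (name : String) (start : Nat)
    (runs : List (Int × Int × String)) (offs : List Nat)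
    (h : ∀ o ∈ offs, pvWhileA t p start o 0 < 10) :
    pvOffLoopA t p name start runs offs = runs := by
  induction offs with
  | nil => rfl
  | cons o rest ih =>
    simp only [pvOffLoopA]
    rw [if_neg (Nat.not_le.mpr (h o (by simp)))]
    exact ih (fun o' ho' => h o' (by simp [ho']))

theorem offLoopA_hit (t p : List Char) (name : String) (start : Nat)
    (runs : List (Int × Int × String)) (l1 l2 : List Nat) (o : Nat)
    (h1 : ∀ o' ∈ l1, pvWhileA t p start o' 0 < 10)
    (h2 : 10 ≤ pvWhileA t p start o 0) :
    pvOffLoopA t p name start runs (l1 ++ o :: l2) =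
      if runs.any (fun r => decide ((start : Int) < r.2.1) &&
          decide (r.1 < (start : Int) + (pvWhileA t p start o 0 : Int))) then runs
      else runs ++ [((start : Int), (start : Int) + (pvWhileA t p start o 0 : Int), name)] := by
  induction l1 with
  | nil =>
    simp only [List.nil_append, pvOffLoopA]
    rw [if_pos h2]
  | cons o' l1' ih =>
    simp only [List.cons_append, pvOffLoopA]
    rw [if_neg (Nat.not_le.mpr (h1 o' (by simp)))]
    exact ih (fun x hx => h1 x (by simp [hx]))

theorem getElem_of_idxOf_eq {p : List Char} {c : Char} {m : Nat}
    (h : p.idxOf c = m) (hm : m < p.length) : p[m] = c := by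
  subst h
  exact List.getElem_idxOf hm

theorem nxtB_aux (p : List Char) (hp : p.Nodup) (c : Char) :
    ∀ (m : Nat), m < p.length →
      ((List.range m).foldl (fun d i => d.insert (p.getD i ' ') (p.getD (i + 1) ' '))
          PySem.Dict.empty).get? c =
        if c ∈ p ∧ p.idxOf c < m then some (p.getD (p.idxOf c + 1) ' ') else none := by
  intro m
  induction m with
  | zero => intro _; simp [PySem.Dict.get?_empty]
  | succ m ih =>
    intro hm
    rw [List.range_succ, List.foldl_append, List.foldl_cons, List.foldl_nil,
      PySem.Dict.get?_insert]
    have hmlt : m < p.length := by omega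
    by_cases hc : c = p.getD m ' '
    · rw [if_pos hc]
      have hcm : c = p[m] := by rwa [List.getD_eq_getElem _ _ hmlt] at hc
      have hcmem : c ∈ p := hcm ▸ List.getElem_mem hmlt
      have hidx : p.idxOf c = m := by rw [hcm]; exact hp.idxOf_getElem m hmlt
      rw [if_pos ⟨hcmem, by omega⟩, hidx]
    · rw [if_neg hc, ih hmlt]
      have hcm : c ≠ p[m] := by rwa [List.getD_eq_getElem _ _ hmlt] at hc
      by_cases hcp : c ∈ p
      · have hne : p.idxOf c ≠ m := fun h => hcm (getElem_of_idxOf_eq h hmlt).symm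
        by_cases hlt : p.idxOf c < m
        · rw [if_pos ⟨hcp, hlt⟩, if_pos ⟨hcp, by omega⟩]
        · rw [if_neg (fun hx => hlt hx.2), if_neg (fun hx => absurd hx.2 (by omega))]
      · rw [if_neg (fun hx => hcp hx.1), if_neg (fun hx => hcp hx.1)]

theorem nxtB_get (p : List Char) (hp : p.Nodup) (c : Char) :
    (pvNxtB p).get? c =
      if c ∈ p ∧ p.idxOf c + 1 < p.length then some (p.getD (p.idxOf c + 1) ' ')
      else none := by
  unfold pvNxtB
  cases hp0 : p.length with
  | zero =>
    have hnil : p = [] := List.length_eq_zero_iff.mp hp0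
    subst hnil
    simp [PySem.Dict.get?_empty]
  | succ n =>
    rw [Nat.add_sub_cancel, nxtB_aux p hp c n (by omega)]
    by_cases hcp : c ∈ p
    · by_cases hlt : p.idxOf c < n
      · rw [if_pos ⟨hcp, hlt⟩, if_pos ⟨hcp, by omega⟩]
      · rw [if_neg (fun hx => hlt hx.2), if_neg (fun hx => hlt (by omega))]
    · rw [if_neg (fun hx => hcp hx.1), if_neg (fun hx => hcp hx.1)]

theorem runlenB_eq (p : List Char) (hp : p.Nodup) (t : List Char) :
    pvRunlenB (PySem.Set.ofList p) (pvNxtB p) t = t.tails.map (rlSpec p) := by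
  induction t with
  | nil => rfl
  | cons c rest ih =>
    simp only [pvRunlenB]
    rw [ih, List.tails_cons, List.map_cons]
    congr 1
    by_cases hcp : c ∈ p
    · have hcont : PySem.Set.contains (PySem.Set.ofList p) c = true := by
        rw [PySem.Set.contains_iff, PySem.Set.mem_ofList]; exact hcp
      rw [if_pos hcont]
      have hj : p.idxOf c < p.length := List.idxOf_lt_length_of_mem hcp
      have hpj : p[p.idxOf c] = c := List.getElem_idxOf hj
      have hdropj : p.drop (p.idxOf c) = c :: p.drop (p.idxOf c + 1) := by
        rw [List.drop_eq_getElem_cons hj, hpj]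
      cases rest with
      | nil =>
        simp [rlSpec, hcp, hdropj, myLcp_cons_cons, myLcp_nil_left]
      | cons c2 rest2 =>
        rw [List.tails_cons, List.map_cons, List.headD_cons]
        show (if (pvNxtB p).get? c = some c2 then rlSpec p (c2 :: rest2) + 1 else 1) =
          rlSpec p (c :: c2 :: rest2)
        by_cases hnx : (pvNxtB p).get? c = some c2
        · rw [if_pos hnx]
          have hsucc : p.idxOf c + 1 < p.length ∧ p.getD (p.idxOf c + 1) ' ' = c2 := by
            rw [nxtB_get p hp c] at hnx
            by_cases hh : c ∈ p ∧ p.idxOf c + 1 < p.length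
            · rw [if_pos hh] at hnx
              exact ⟨hh.2, Option.some_inj.mp hnx⟩
            · rw [if_neg hh] at hnx
              cases hnx
          obtain ⟨hlt1, hc2⟩ := hsucc
          have hgc2 : p[p.idxOf c + 1] = c2 := by
            rwa [List.getD_eq_getElem _ _ hlt1] at hc2
          have hc2mem : c2 ∈ p := hgc2 ▸ List.getElem_mem hlt1
          have hidx2 : p.idxOf c2 = p.idxOf c + 1 := by
            have h2 := List.getElem_idxOf (List.idxOf_lt_length_of_mem hc2mem)
            exact (hp.getElem_inj_iff).mp (by rw [h2, hgc2])
          simp only [rlSpec]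
          rw [if_pos hcp, if_pos hc2mem, hidx2, hdropj, myLcp_cons_cons, if_pos rfl]
        · rw [if_neg hnx]
          simp only [rlSpec]
          rw [if_pos hcp, hdropj, myLcp_cons_cons, if_pos rfl]
          suffices h0 : myLcp (c2 :: rest2) (p.drop (p.idxOf c + 1)) = 0 by rw [h0]
          rcases Nat.lt_or_ge (p.idxOf c + 1) p.length with hlt | hge
          · rw [List.drop_eq_getElem_cons hlt, myLcp_cons_cons, if_neg]
            intro hcc
            apply hnx
            rw [nxtB_get p hp c, if_pos ⟨hcp, hlt⟩, List.getD_eq_getElem _ _ hlt]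
            exact congrArg some hcc.symm
          · rw [List.drop_eq_nil_of_le hge, myLcp_nil_right]
    · have hcont : ¬ PySem.Set.contains (PySem.Set.ofList p) c = true := by
        rw [PySem.Set.contains_iff, PySem.Set.mem_ofList]; exact hcp
      rw [if_neg hcont]
      cases rest with
      | nil => simp only [rlSpec, if_neg hcp]
      | cons c2 rest2 => simp only [rlSpec, if_neg hcp]

theorem core_step (t p : List Char) (hp : p.Nodup) (name : String) (start : Nat)
    (runs : List (Int × Int × String)) :
    pvOffLoopA t p name start runs (List.range p.length) =
      if 10 ≤ rlSpec p (t.drop start) then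
        if runs.all (fun r => !(decide ((start : Int) < r.2.1) &&
            decide (r.1 < (start : Int) + (rlSpec p (t.drop start) : Int)))) then
          runs ++ [((start : Int), (start : Int) + (rlSpec p (t.drop start) : Int), name)]
        else runs
      else runs := by
  cases hdrop : t.drop start with
  | nil =>
    rw [offLoopA_skip t p name start runs _
      (fun o _ => by rw [pvWhileA_zero, hdrop, myLcp_nil_left]; omega)]
    simp [rlSpec]
  | cons c ts =>
    by_cases hcp : c ∈ p
    · have hj : p.idxOf c < p.length := List.idxOf_lt_length_of_mem hcp
      have hpj : p[p.idxOf c] = c := List.getElem_idxOf hj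
      have hM0 : ∀ o : Nat, o ≠ p.idxOf c → myLcp (c :: ts) (p.drop o) = 0 := by
        intro o ho
        rcases Nat.lt_or_ge o p.length with h1 | h1
        · rw [List.drop_eq_getElem_cons h1, myLcp_cons_cons, if_neg]
          intro hco
          exact ho ((hp.getElem_inj_iff).mp (by rw [hpj, ← hco])).symm
        · rw [List.drop_eq_nil_of_le h1, myLcp_nil_right]
      have hrl : rlSpec p (c :: ts) = myLcp (c :: ts) (p.drop (p.idxOf c)) := by
        simp only [rlSpec, if_pos hcp]
      by_cases hge : 10 ≤ rlSpec p (c :: ts)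
      · have hsplit : List.range p.length =
            List.range (p.idxOf c) ++ p.idxOf c ::
              List.range' (p.idxOf c + 1) (p.length - (p.idxOf c + 1)) := by
          calc List.range p.length
              = List.range' 0 p.length := List.range_eq_range'
            _ = List.range' 0 (p.idxOf c + (p.length - p.idxOf c)) := by
                  rw [Nat.add_sub_cancel' (Nat.le_of_lt hj)]
            _ = List.range' 0 (p.idxOf c) ++ List.range' (0 + p.idxOf c) (p.length - p.idxOf c) :=
                  List.range'_append_1.symm
            _ = List.range (p.idxOf c) ++ p.idxOf c ::
                  List.range' (p.idxOf c + 1) (p.length - (p.idxOf c + 1)) := by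
                  rw [← List.range_eq_range', Nat.zero_add,
                    show p.length - p.idxOf c = (p.length - (p.idxOf c + 1)) + 1 from by omega,
                    List.range'_succ]
        have hwj : pvWhileA t p start (p.idxOf c) 0 = rlSpec p (c :: ts) := by
          rw [pvWhileA_zero, hdrop, hrl]
        rw [hsplit, offLoopA_hit t p name start runs _ _ _
          (fun o' ho' => by
            rw [pvWhileA_zero, hdrop, hM0 o' (by have := List.mem_range.mp ho'; omega)]
            omega)
          (by rw [hwj]; exact hge), hwj]
        rw [if_pos hge, ← List.not_any_eq_all_not]
        cases hAny : runs.any (fun r => decide ((start : Int) < r.2.1) &&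
            decide (r.1 < (start : Int) + (rlSpec p (c :: ts) : Int))) <;> simp
      · rw [offLoopA_skip t p name start runs _
          (fun o _ => by
            rw [pvWhileA_zero, hdrop]
            by_cases ho : o = p.idxOf c
            · rw [ho, ← hrl]; omega
            · rw [hM0 o ho]; omega), if_neg hge]
    · have hM0 : ∀ o : Nat, myLcp (c :: ts) (p.drop o) = 0 := by
        intro o
        rcases Nat.lt_or_ge o p.length with h1 | h1
        · rw [List.drop_eq_getElem_cons h1, myLcp_cons_cons, if_neg]
          intro hco
          exact hcp (hco ▸ List.getElem_mem h1)
        · rw [List.drop_eq_nil_of_le h1, myLcp_nil_right]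
      rw [offLoopA_skip t p name start runs _
        (fun o _ => by rw [pvWhileA_zero, hdrop, hM0 o]; omega)]
      simp [rlSpec, hcp]

theorem startLoops_eq (t p : List Char) (hp : p.Nodup) (name : String) :
    ∀ (d k : Nat), t.length - k = d → ∀ runs,
      pvStartLoopA t p name runs (List.range' k (t.length - k)) =
        pvStartLoopB name (t.tails.map (rlSpec p)) runs
          (List.range' k (t.length + 1 - 10 - k)) := by
  intro d
  induction d with
  | zero =>
    intro k hk runs
    rw [hk, show t.length + 1 - 10 - k = 0 from by omega]
    rfl
  | succ d ihd =>
    intro k hk runs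
    rw [show t.length - k = (t.length - (k + 1)) + 1 from by omega, List.range'_succ]
    simp only [pvStartLoopA]
    by_cases hrem : t.length - k < 10
    · rw [if_pos hrem, show t.length + 1 - 10 - k = 0 from by omega]
      rfl
    · rw [if_neg hrem,
        show t.length + 1 - 10 - k = (t.length + 1 - 10 - (k + 1)) + 1 from by omega,
        List.range'_succ]
      simp only [pvStartLoopB]
      have hgd : (t.tails.map (rlSpec p)).getD k 0 = rlSpec p (t.drop k) := by
        have hlt : k < (t.tails.map (rlSpec p)).length := by
          rw [List.length_map, List.length_tails]; omega
        rw [List.getD_eq_getElem _ _ hlt, List.getElem_map, List.getElem_tails]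
      rw [hgd, core_step t p hp name k runs]
      exact ihd (k + 1) (by omega) _

theorem per_pattern (t p : List Char) (hp : p.Nodup) (name : String)
    (runs : List (Int × Int × String)) :
    pvStartLoopA t p name runs (List.range t.length) =
      pvStartLoopB name (pvRunlenB (PySem.Set.ofList p) (pvNxtB p) t) runs
        (List.range (t.length + 1 - 10)) := by
  rw [runlenB_eq p hp t]
  simpa [List.range_eq_range'] using startLoops_eq t p hp name t.length 0 rfl runs

theorem runs_eq (t : List Char) :
    pvPatternsA.foldl (fun runs pr => pvStartLoopA t pr.1 pr.2 runs (List.range t.length)) [] =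
      pvPatternsB.foldl (fun runs pr =>
        pvStartLoopB pr.2 (pvRunlenB (PySem.Set.ofList pr.1) (pvNxtB pr.1) t) runs
          (List.range (t.length + 1 - 10))) [] := by
  rw [show pvPatternsB = pvPatternsA from rfl]
  apply PySem.List.foldl_congr_mem
  intro runs pr hpr
  rw [show pvPatternsA =
      [(pvAZ_FORWARD, "az_forward"), (pvAZ_REVERSE, "az_reverse"), (pvQWERTY_FULL, "qwerty"),
       ("QWERTYUIOP".toList, "qwerty_row1"), ("ASDFGHJKL".toList, "qwerty_row2"),
       ("ZXCVBNM".toList, "qwerty_row3")] from by decide] at hpr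
  simp only [List.mem_cons, List.not_mem_nil, or_false] at hpr
  rcases hpr with rfl | rfl | rfl | rfl | rfl | rfl <;>
    exact per_pattern t _ (by decide) _ runs

-- ===== VERDICT (by name: the statement is the Claim_ definition above) =====
theorem find_alphabet_runs_py_spec : Claim_equal_find_alphabet_runs_py := by
  intro text _
  show find_alphabet_runs_py text = find_alphabet_runs_py_alt text
  exact congrArg
    (fun rs => (PySem.List.sorted2 rs (fun r => r.1) (fun r => -(r.2.1 - r.1))).foldl pvMergeB [])
    (runs_eq text.toList)
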